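-- pv_equiv track=rewrite | github.com/WallerTsai/OJ-Solution | leetcode-py/逻辑与思维/结论题/No3723.py | maxSumOfSquares
-- ===== SOURCE A (Python) =====
-- def maxSumOfSquares(num: int, sum: int) -> str:
--     path = []
--     for _ in range(num):
--         if sum > 9:
--             path.append(9)
--             sum -= 9
--         elif sum > 0:
--             path.append(sum)
--             sum -= sum
--         else:
--             path.append(0)
--     return ''.join(map(str, path)) if not sum else ""
-- ===== SOURCE B (Python) =====
-- def maxSumOfSquares(num: int, sum: int) -> str:
--     if sum < 0:
--         return ""
--     nines, rem = divmod(sum, 9)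
--     needed = nines + (1 if rem else 0)
--     if needed > num:
--         return ""
--     return '9' * nines + (str(rem) if rem else '') + '0' * (num - needed)
-- ===== Notes on version B (the rewrite author's own statement) =====
-- stated objective: faster
-- what changed: Replaced the per-digit greedy loop over range(num) with a closed-form digit count (divmod(sum, 9)) and string-repetition construction '9'*nines + remainder + '0'*padding.
import Mathlib
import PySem

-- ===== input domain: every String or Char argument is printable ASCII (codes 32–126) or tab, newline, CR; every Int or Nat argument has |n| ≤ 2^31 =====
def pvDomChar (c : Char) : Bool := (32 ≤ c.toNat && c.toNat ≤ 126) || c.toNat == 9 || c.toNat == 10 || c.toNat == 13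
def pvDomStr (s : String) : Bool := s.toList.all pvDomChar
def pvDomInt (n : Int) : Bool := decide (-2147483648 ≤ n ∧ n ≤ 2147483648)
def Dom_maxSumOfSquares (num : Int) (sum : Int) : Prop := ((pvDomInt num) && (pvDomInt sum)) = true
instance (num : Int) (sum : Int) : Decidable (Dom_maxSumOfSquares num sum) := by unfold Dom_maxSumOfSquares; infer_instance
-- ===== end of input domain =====

-- B replaces A's per-digit greedy loop by a closed-form divmod(sum,9) digit count and string repetition (constant-factor faster: no per-digit loop).


-- ===== PORT A =====
-- one loop step: the body of 'for _ in range(num)'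
def pvStepA (st : List Int × Int) : List Int × Int :=
  if st.2 > 9 then (st.1 ++ [(9 : Int)], st.2 - 9)
  else if st.2 > 0 then (st.1 ++ [st.2], st.2 - st.2)
  else (st.1 ++ [(0 : Int)], st.2)

def maxSumOfSquares (num : Int) (sum : Int) : String :=
  let st := (PySem.List.pyRange 0 num 1).foldl (fun st _ => pvStepA st) (([] : List Int), sum)
  if st.2 ≠ 0 then "" else PySem.Str.join "" (st.1.map PySem.Int.toStr)

-- ===== PORT B =====
-- '9'*n, str(rem), '0'*n concatenation built on the char-list side (Python's '*' on a
-- negative count gives "", matched exactly by Int.toNat clamping)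
def maxSumOfSquares_alt (num : Int) (sum : Int) : String :=
  if sum < 0 then ""
  else
    let nines := PySem.Int.floordiv sum 9
    let rem := PySem.Int.mod sum 9
    let needed := nines + (if rem ≠ 0 then 1 else 0)
    if needed > num then ""
    else String.mk (List.replicate nines.toNat '9'
      ++ (if rem ≠ 0 then PySem.Int.toChars rem else [])
      ++ List.replicate (num - needed).toNat '0')

-- ===== PRECONDITION & SPEC =====
def Spec_maxSumOfSquares (num : Int) (sum : Int) (out : String) : Prop := out = maxSumOfSquares_alt num sum
instance (num : Int) (sum : Int) (out : String) : Decidable (Spec_maxSumOfSquares num sum out) := by unfold Spec_maxSumOfSquares; infer_instance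

-- ===== CLAIM (what is proved, stated in full; the proofs are below) =====
def Claim_equal_maxSumOfSquares : Prop := ∀ (num : Int) (sum : Int), Dom_maxSumOfSquares num sum → Spec_maxSumOfSquares num sum (maxSumOfSquares num sum)

-- ===== LEMMAS AND PROOFS =====

-- digits emitted / remaining sum after n iterations of A's loop
def pvDigitsA : Nat → Int → List Int
  | 0, _ => []
  | n + 1, s =>
    if s > 9 then 9 :: pvDigitsA n (s - 9)
    else if s > 0 then s :: pvDigitsA n (s - s)
    else 0 :: pvDigitsA n s

def pvSumA : Nat → Int → Int
  | 0, s => s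
  | n + 1, s =>
    if s > 9 then pvSumA n (s - 9)
    else if s > 0 then pvSumA n (s - s)
    else pvSumA n s

lemma pvFoldl_ignore_iterate {α β : Type} (g : α → α) (l : List β) (a : α) :
    l.foldl (fun st _ => g st) a = g^[l.length] (a) := by
  induction l generalizing a with
  | nil => rfl
  | cons x t ih => simp [List.foldl_cons, ih, Function.iterate_succ_apply]

lemma pvIterate_stepA (n : Nat) (path : List Int) (s : Int) :
    pvStepA^[n] (path, s) = (path ++ pvDigitsA n s, pvSumA n s) := by
  induction n generalizing path s with
  | zero => simp [pvDigitsA, pvSumA]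
  | succ n ih =>
    rw [Function.iterate_succ_apply]
    by_cases h1 : s > 9
    · simp [pvStepA, h1, pvDigitsA, pvSumA, ih]
    · by_cases h2 : s > 0
      · simp [pvStepA, h1, h2, pvDigitsA, pvSumA, ih]
      · simp [pvStepA, h1, h2, pvDigitsA, pvSumA, ih]

lemma pvSumA_nonpos (n : Nat) (s : Int) (h : s ≤ 0) : pvSumA n s = s := by
  induction n generalizing s with
  | zero => rfl
  | succ n ih =>
    unfold pvSumA
    rw [if_neg (by omega), if_neg (by omega)]
    exact ih s h

lemma pvSumA_nonneg (n : Nat) (s : Int) (h : 0 ≤ s) : pvSumA n s = max (s - 9 * n) 0 := by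
  induction n generalizing s with
  | zero => unfold pvSumA; omega
  | succ n ih =>
    unfold pvSumA
    by_cases h1 : s > 9
    · rw [if_pos h1, ih (s - 9) (by omega)]; push_cast; omega
    · by_cases h2 : s > 0
      · rw [if_neg h1, if_pos h2, show s - s = 0 by ring, ih 0 le_rfl]; push_cast; omega
      · rw [if_neg h1, if_neg h2, pvSumA_nonpos n s (by omega)]; push_cast; omega

lemma pvDigitsA_closed (n : Nat) (s : Int) (h0 : 0 ≤ s) (h9 : s ≤ 9 * n) :
    pvDigitsA n s = List.replicate (s / 9).toNat 9
      ++ (if s % 9 ≠ 0 then [s % 9] else [])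
      ++ List.replicate (n - ((s / 9) + (if s % 9 ≠ 0 then 1 else 0)).toNat) 0 := by
  induction n generalizing s with
  | zero =>
    have hs : s = 0 := by omega
    subst hs; simp [pvDigitsA]
  | succ n ih =>
    unfold pvDigitsA
    by_cases h1 : s > 9
    · rw [if_pos h1, ih (s - 9) (by omega) (by push_cast; omega)]
      have hm : (s - 9) % 9 = s % 9 := by omega
      have hq : (s / 9).toNat = ((s - 9) / 9).toNat + 1 := by omega
      rw [hm, hq, List.replicate_succ]
      by_cases hr : s % 9 ≠ 0
      · simp only [if_pos hr]
        rw [show n - ((s - 9) / 9 + 1).toNat = n + 1 - (s / 9 + 1).toNat by omega]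
        simp
      · simp only [if_neg hr]
        rw [show n - ((s - 9) / 9 + 0).toNat = n + 1 - (s / 9 + 0).toNat by omega]
        simp
    · by_cases h2 : s > 0
      · rw [if_neg h1, if_pos h2, show s - s = 0 by ring,
          ih 0 le_rfl (by positivity)]
        simp only [Int.zero_ediv, Int.zero_emod, ne_eq, not_true_eq_false, if_false,
          Int.toNat_zero, Nat.sub_zero, List.replicate_zero, List.nil_append,
          List.append_nil, Int.add_zero]
        by_cases h9' : s = 9
        · subst h9'
          rw [show ((9:Int) / 9) = 1 by decide, show ((9:Int) % 9) = 0 by decide]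
          simp
        · rw [show s / 9 = 0 by omega, show s % 9 = s by omega,
            if_pos (show s ≠ 0 by omega), if_pos (show s ≠ 0 by omega)]
          simp
      · rw [if_neg h1, if_neg h2]
        have hs : s = 0 := by omega
        subst hs
        rw [ih 0 le_rfl (by positivity)]
        simp [List.replicate_succ]

lemma pvJoinNil_flatten (ss : List (List Char)) :
    PySem.Chars.join [] ss = ss.flatten := by
  induction ss with
  | nil => rfl
  | cons a t ih =>
    cases t with
    | nil => simp [PySem.Chars.join_singleton]
    | cons b u => rw [PySem.Chars.join_cons_cons]; simp [ih]

lemma pvFlatten_replicate_singleton (n : Nat) (c : Char) :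
    (List.replicate n ([c] : List Char)).flatten = List.replicate n c := by
  induction n with
  | zero => rfl
  | succ n ih => simp [List.replicate_succ, ih]

-- ===== VERDICT (by name: the statement is the Claim_ definition above) =====
theorem maxSumOfSquares_spec : Claim_equal_maxSumOfSquares := by
  intro num sum _
  unfold Spec_maxSumOfSquares maxSumOfSquares maxSumOfSquares_alt
  rw [pvFoldl_ignore_iterate, PySem.List.length_pyRange_one, pvIterate_stepA]
  simp only [Int.sub_zero, List.nil_append]
  rw [PySem.Int.floordiv_eq_ediv_of_pos (by norm_num), PySem.Int.mod_eq_emod_of_pos (by norm_num)]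
  by_cases hneg : sum < 0
  · rw [if_pos hneg,
      if_pos (show pvSumA num.toNat sum ≠ 0 by rw [pvSumA_nonpos _ _ (by omega)]; omega)]
  · rw [if_neg hneg]
    have h0 : 0 ≤ sum := by omega
    have hfin : pvSumA num.toNat sum = max (sum - 9 * num.toNat) 0 := pvSumA_nonneg _ _ h0
    have hd := Int.ediv_add_emod sum 9
    have h1 : 0 ≤ sum % 9 := Int.emod_nonneg sum (by norm_num)
    have h2 : sum % 9 < 9 := Int.emod_lt_of_pos sum (by norm_num)
    have hqn : 0 ≤ sum / 9 := Int.ediv_nonneg h0 (by norm_num)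
    by_cases hgt : (sum / 9 + (if sum % 9 ≠ 0 then 1 else 0)) > num
    · rw [if_pos hgt]
      by_cases hz : pvSumA num.toNat sum = 0
      · have hnum : num < 0 := by
          rw [hfin] at hz; split_ifs at hgt <;> omega
        have hs0 : sum = 0 := by rw [hfin] at hz; omega
        rw [if_neg (by simpa using hz), hs0,
          show num.toNat = 0 from by omega]
        rfl
      · rw [if_pos (by simpa using hz)]
    · rw [if_neg hgt]
      have hle : sum ≤ 9 * num.toNat := by split_ifs at hgt <;> omega
      rw [if_neg (show ¬ pvSumA num.toNat sum ≠ 0 by rw [hfin]; omega),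
        pvDigitsA_closed num.toNat sum h0 hle]
      -- both sides are String.mk of the same char list
      have hjoin : ∀ l : List String, PySem.Str.join "" l
          = String.mk (PySem.Chars.join [] (l.map String.toList)) := by
        intro l; rfl
      rw [hjoin]
      congr 1
      rw [pvJoinNil_flatten]
      simp only [List.map_append, List.map_map, List.map_replicate,
        Function.comp_apply, List.flatten_append]
      have ht9 : (PySem.Int.toStr 9).toList = ['9'] := by decide
      have ht0 : (PySem.Int.toStr 0).toList = ['0'] := by decide
      rw [ht9, ht0, pvFlatten_replicate_singleton, pvFlatten_replicate_singleton]
      by_cases hr : sum % 9 ≠ 0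
      · rw [if_pos hr, if_pos hr, if_pos hr,
          show (num.toNat - (sum / 9 + 1).toNat : Nat) = (num - (sum / 9 + 1)).toNat by
            split_ifs at hgt <;> omega]
        simp [PySem.Int.toList_toStr]
      · rw [if_neg hr, if_neg hr, if_neg hr,
          show (num.toNat - (sum / 9 + 0).toNat : Nat) = (num - (sum / 9 + 0)).toNat by
            split_ifs at hgt <;> omega]
        simp
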